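-- pv_equiv track=rewrite | github.com/grisuno/LazyOwn | utils.py | crack_password
-- ===== SOURCE A (Python) =====
-- def is_digit(the_digit):
--     """Check if the given character is a digit.
--
--     Args:
--         the_digit (str): The character to check.
--
--     Returns:
--         bool: True if the character is a digit, False otherwise.
--     """
--     return the_digit in '0123456789'
--
-- def crack_password(crypttext):
--     """Crack a Cisco Type 7 password.
--
--     Args:
--         crypttext (str): The encrypted password in Type 7 format.
--
--     Returns:
--         str: The cracked plaintext password or an empty string if invalid.
--     """
--     crypttext = crypttext.upper()
--     plaintext = ''
--     xlat = "dsfd;kfoA,.iyewrkldJKDHSUBsgvca69834ncxv9873254k;fg87"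
--     seed, val = 0, 0
--
--     if len(crypttext) % 2 != 0:
--         return ""
--
--     seed = (ord(crypttext[0]) - 0x30) * 10 + ord(crypttext[1]) - 0x30
--
--     if seed > 15 or not is_digit(crypttext[0]) or not is_digit(crypttext[1]):
--         return ""
--
--     for i in range(2, len(crypttext)):
--         val *= 16
--
--         if is_digit(crypttext[i]):
--             val += ord(crypttext[i]) - 0x30
--         elif 'A' <= crypttext[i] <= 'F':
--             val += ord(crypttext[i]) - ord('A') + 0x0A
--         else:
--             return ""
--
--         if i % 2 != 0:
--             plaintext += chr(val ^ ord(xlat[seed]))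
--             seed = (seed + 1) % len(xlat)
--             val = 0
--
--     return plaintext
-- ===== SOURCE B (Python) =====
-- def _nibble(c):
--     if '0' <= c <= '9':
--         return ord(c) - 48
--     if 'A' <= c <= 'F':
--         return ord(c) - 55
--     return None
--
-- def crack_password(crypttext):
--     xlat = "dsfd;kfoA,.iyewrkldJKDHSUBsgvca69834ncxv9873254k;fg87"
--     ct = crypttext.upper()
--     if not ct or len(ct) % 2 != 0:
--         return ""
--     if not ('0' <= ct[0] <= '9' and '0' <= ct[1] <= '9'):
--         return ""
--     seed = (ord(ct[0]) - 48) * 10 + (ord(ct[1]) - 48)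
--     if seed > 15:
--         return ""
--     out = []
--     for i in range(2, len(ct), 2):
--         hi = _nibble(ct[i])
--         lo = _nibble(ct[i + 1])
--         if hi is None or lo is None:
--             return ""
--         out.append(chr((hi * 16 + lo) ^ ord(xlat[seed])))
--         seed = (seed + 1) % len(xlat)
--     return "".join(out)
-- ===== Notes on version B (the rewrite author's own statement) =====
-- stated objective: alternative
-- what changed: B validates the header once and then decodes the hex body byte-at-a-time (index step 2, each pair decoded to hi/lo nibbles and XORed immediately), instead of A's char-at-a-time loop that accumulates val with an i%2 parity flag.
import Mathlib
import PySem

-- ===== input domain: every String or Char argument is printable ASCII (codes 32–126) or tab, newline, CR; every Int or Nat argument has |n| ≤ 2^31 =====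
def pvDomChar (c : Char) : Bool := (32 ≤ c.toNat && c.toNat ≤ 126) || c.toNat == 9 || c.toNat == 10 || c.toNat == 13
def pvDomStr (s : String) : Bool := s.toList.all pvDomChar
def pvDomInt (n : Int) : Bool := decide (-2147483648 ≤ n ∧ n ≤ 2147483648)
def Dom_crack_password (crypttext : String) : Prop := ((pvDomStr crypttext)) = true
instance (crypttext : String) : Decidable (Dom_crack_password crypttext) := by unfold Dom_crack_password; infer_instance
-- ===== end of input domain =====

-- B decodes the hex body one byte (two chars) at a time with explicit nibble decoding,
-- instead of A's one-char-at-a-time loop accumulating `val` under an i%2 parity flag. Objective: alternative.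

-- ===== PORT A =====
def pvXlat : List Char := "dsfd;kfoA,.iyewrkldJKDHSUBsgvca69834ncxv9873254k;fg87".toList

-- port of is_digit: membership in the string '0123456789'
def pyIsDigit (c : Char) : Bool := "0123456789".toList.contains c

-- the `for i in range(2, len(crypttext))` loop of A, with its early `return ''` as `none`
def crackALoop : List Char → Nat → Int → Int → List Char → Option (List Char)
  | [], _, _, _, acc => some acc
  | c :: rest, i, seed, val, acc =>
    let val1 := val * 16
    match (if pyIsDigit c then some (val1 + (c.toNat : Int) - 0x30)
           else if 'A' ≤ c ∧ c ≤ 'F' then some (val1 + (c.toNat : Int) - ('A'.toNat : Int) + 0xA)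
           else none : Option Int) with
    | none => none
    | some val2 =>
      if i % 2 ≠ 0 then
        match PySem.List.pyGet? pvXlat seed with
        | none => none   -- Python would raise IndexError here; unreachable (seed is always in [0, 53))
        | some x =>
          crackALoop rest (i + 1) (PySem.Int.mod (seed + 1) 53) 0
            (acc ++ [Char.ofNat (val2.toNat ^^^ x.toNat)])
      else crackALoop rest (i + 1) seed val2 acc

def crack_password (crypttext : String) : String :=
  let ct := (PySem.Str.upper crypttext).toList
  if PySem.Int.mod (ct.length : Int) 2 ≠ 0 then ""
  else
    match ct with
    | c0 :: c1 :: rest =>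
      let seed : Int := ((c0.toNat : Int) - 0x30) * 10 + (c1.toNat : Int) - 0x30
      if seed > 15 ∨ pyIsDigit c0 = false ∨ pyIsDigit c1 = false then ""
      else
        match crackALoop rest 2 seed 0 [] with
        | none => ""
        | some cs => String.ofList cs
    | _ => ""   -- crypttext[0] raises IndexError in Python (empty string); outside Pre_

-- ===== PORT B =====
def pvXlatB : List Char := "dsfd;kfoA,.iyewrkldJKDHSUBsgvca69834ncxv9873254k;fg87".toList

-- port of _nibble
def nibble? (c : Char) : Option Nat :=
  if '0' ≤ c ∧ c ≤ '9' then some (c.toNat - 48)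
  else if 'A' ≤ c ∧ c ≤ 'F' then some (c.toNat - 55)
  else none

-- the `for i in range(2, len(ct), 2)` loop of B: one byte (two chars) per step
def crackBLoop : List Char → Int → Option (List Char)
  | [], _ => some []
  | [_], _ => some []   -- unreachable: the body handed to the loop has even length
  | c :: d :: rest, seed =>
    (nibble? c).bind fun hi =>
    (nibble? d).bind fun lo =>
    (PySem.List.pyGet? pvXlatB seed).bind fun x =>   -- none = IndexError; unreachable
    (crackBLoop rest (PySem.Int.mod (seed + 1) 53)).map fun tl =>
      Char.ofNat ((hi * 16 + lo) ^^^ x.toNat) :: tl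

def crack_password_alt (crypttext : String) : String :=
  let ct := (PySem.Str.upper crypttext).toList
  if ct.isEmpty ∨ PySem.Int.mod (ct.length : Int) 2 ≠ 0 then ""
  else
    match ct with
    | [] => ""   -- unreachable: ct nonempty here
    | [_] => ""   -- unreachable: ct has even length, so at least 2 chars
    | c0 :: c1 :: rest =>
      if ¬ (('0' ≤ c0 ∧ c0 ≤ '9') ∧ ('0' ≤ c1 ∧ c1 ≤ '9')) then ""
      else
        let seed : Int := ((c0.toNat : Int) - 48) * 10 + ((c1.toNat : Int) - 48)
        if seed > 15 then ""
        else (crackBLoop rest seed).elim "" (fun cs => String.ofList cs)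

-- ===== PRECONDITION & SPEC =====
-- Pre_ excludes only the empty string, on which Python A raises IndexError (crypttext[0]).
def Pre_crack_password (crypttext : String) : Prop := crypttext ≠ ""
instance (crypttext : String) : Decidable (Pre_crack_password crypttext) := by unfold Pre_crack_password; infer_instance
def pvWitness_crack_password : String := "070C285F4D06"

def Spec_crack_password (crypttext : String) (out : String) : Prop := out = crack_password_alt crypttext
instance (crypttext : String) (out : String) : Decidable (Spec_crack_password crypttext out) := by unfold Spec_crack_password; infer_instance

-- ===== CLAIM (what is proved, stated in full; the proofs are below) =====
def Claim_equal_crack_password : Prop := ∀ (crypttext : String), Dom_crack_password crypttext → Pre_crack_password crypttext → Spec_crack_password crypttext (crack_password crypttext)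

-- ===== LEMMAS AND PROOFS =====

lemma digits_toList : "0123456789".toList = ['0','1','2','3','4','5','6','7','8','9'] := by decide

lemma pyIsDigit_eq (c : Char) : pyIsDigit c = decide ('0' ≤ c ∧ c ≤ '9') := by
  simp only [pyIsDigit, digits_toList, List.contains_eq_mem, List.mem_cons,
    decide_eq_decide, List.not_mem_nil, or_false]
  constructor
  · rintro (h|h|h|h|h|h|h|h|h|h) <;> subst h <;> exact ⟨by decide, by decide⟩
  · rintro ⟨h1, h2⟩
    have a1 : 48 ≤ c.val.toNat := Char.le_def.mp h1
    have a2 : c.val.toNat ≤ 57 := Char.le_def.mp h2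
    have key : ∀ d : Char, c.val.toNat = d.val.toNat → c = d := by
      intro d h; exact Char.ext (UInt32.toNat_inj.mp h)
    interval_cases h : c.val.toNat
    · exact .inl (key '0' rfl)
    · exact .inr (.inl (key '1' rfl))
    · exact .inr (.inr (.inl (key '2' rfl)))
    · exact .inr (.inr (.inr (.inl (key '3' rfl))))
    · exact .inr (.inr (.inr (.inr (.inl (key '4' rfl)))))
    · exact .inr (.inr (.inr (.inr (.inr (.inl (key '5' rfl))))))
    · exact .inr (.inr (.inr (.inr (.inr (.inr (.inl (key '6' rfl)))))))
    · exact .inr (.inr (.inr (.inr (.inr (.inr (.inr (.inl (key '7' rfl))))))))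
    · exact .inr (.inr (.inr (.inr (.inr (.inr (.inr (.inr (.inl (key '8' rfl)))))))))
    · exact .inr (.inr (.inr (.inr (.inr (.inr (.inr (.inr (.inr (key '9' rfl)))))))))

-- A's inline nibble branch equals B's nibble? decoder (for a nonnegative running value v)
lemma stepA_eq (c : Char) (v : Int) (_hv : 0 ≤ v) :
    (if pyIsDigit c then some (v * 16 + (c.toNat : Int) - 0x30)
     else if 'A' ≤ c ∧ c ≤ 'F' then some (v * 16 + (c.toNat : Int) - ('A'.toNat : Int) + 0xA)
     else none : Option Int)
    = (match nibble? c with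
       | none => none
       | some n => some (v * 16 + (n : Int))) := by
  have h0 : ('0':Char) ≤ c ↔ 48 ≤ c.toNat := Char.le_def
  have h9 : c ≤ ('9':Char) ↔ c.toNat ≤ 57 := Char.le_def
  have hA : ('A':Char) ≤ c ↔ 65 ≤ c.toNat := Char.le_def
  have hF : c ≤ ('F':Char) ↔ c.toNat ≤ 70 := Char.le_def
  rw [pyIsDigit_eq, nibble?]
  split_ifs with h1 h2 h2 <;> simp_all <;> try omega

lemma pvXlatB_eq : pvXlatB = pvXlat := rfl

-- the pairing lemma: A's parity loop over an even-length tail equals B's byte loop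
lemma loop_eq : ∀ n (rest : List Char), rest.length = n → rest.length % 2 = 0 →
    ∀ (seed : Int) (i : Nat), i % 2 = 0 → ∀ (acc : List Char),
    crackALoop rest i seed 0 acc = (crackBLoop rest seed).map (acc ++ ·) := by
  intro n
  induction n using Nat.strong_induction_on with
  | _ n ih =>
    intro rest hn hev seed i hi acc
    match rest with
    | [] => simp [crackALoop, crackBLoop]
    | [c] => simp at hev
    | c :: d :: rest =>
      rw [crackALoop]
      simp only [stepA_eq c 0 le_rfl]
      cases hc : nibble? c with
      | none => simp [crackBLoop, hc]
      | some hi' =>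
        dsimp only
        have hieven : ¬ (i % 2 ≠ 0) := by omega
        rw [if_neg hieven, crackALoop]
        simp only [stepA_eq d ((0:Int) * 16 + (hi' : Int)) (by positivity)]
        cases hd : nibble? d with
        | none => simp [crackBLoop, hc, hd]
        | some lo =>
          dsimp only
          have hodd : (i + 1) % 2 ≠ 0 := by omega
          rw [if_pos hodd]
          cases hx : PySem.List.pyGet? pvXlat seed with
          | none => simp [crackBLoop, hc, hd, pvXlatB_eq, hx]
          | some x =>
            have hn2 : rest.length + 2 = n := by simpa using hn
            have hlen : rest.length = n - 2 := by omega
            have hch : ((((0:Int) * 16 + (hi' : Int)) * 16 + (lo : Int)).toNat) = hi' * 16 + lo := by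
              push_cast; omega
            rw [hch]
            have hrec := ih (n-2) (by omega) rest hlen (by simp at hev; omega)
              (PySem.Int.mod (seed + 1) 53) (i+2) (by omega)
              (acc ++ [Char.ofNat ((hi' * 16 + lo) ^^^ x.toNat)])
            dsimp only
            rw [show i + 1 + 1 = i + 2 from rfl, hrec]
            rw [crackBLoop]
            simp only [hc, hd, pvXlatB_eq, hx]
            cases crackBLoop rest (PySem.Int.mod (seed + 1) 53) with
            | none => simp
            | some tl => simp

-- ===== VERDICT (by name: the statement is the Claim_ definition above) =====
theorem crack_password_spec : Claim_equal_crack_password := by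
  unfold Claim_equal_crack_password
  intro s _ _
  unfold Spec_crack_password crack_password crack_password_alt
  cases h : (PySem.Str.upper s).toList with
  | nil => simp
  | cons c0 t =>
    cases t with
    | nil => simp
    | cons c1 rest =>
      simp only [List.length_cons, List.isEmpty_cons]
      have hmod : PySem.Int.mod ((rest.length + 1 + 1 : Nat) : Int) 2
          = (((rest.length + 1 + 1) % 2 : Nat) : Int) := PySem.Int.mod_natCast _ 2
      by_cases hev : rest.length % 2 = 0
      · have hz : PySem.Int.mod (((rest.length + 1 + 1 : Nat) : Int)) 2 = 0 := by
          rw [hmod]; simp; omega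
        rw [if_neg (not_ne_iff.mpr hz),
            if_neg (show ¬((false : Bool) = true ∨ PySem.Int.mod (((rest.length + 1 + 1 : Nat)) : Int) 2 ≠ 0) from
              fun hor => hor.elim (fun he => by simp at he) (fun hne => hne hz))]
        simp only [pyIsDigit_eq]
        by_cases hd0 : ('0' ≤ c0 ∧ c0 ≤ '9')
        · by_cases hd1 : ('0' ≤ c1 ∧ c1 ≤ '9')
          · by_cases hs : (15 : Int) < ((c0.toNat : Int) - 48) * 10 + (c1.toNat : Int) - 48
            · rw [if_pos (Or.inl hs),
                  if_neg (show ¬¬(('0' ≤ c0 ∧ c0 ≤ '9') ∧ ('0' ≤ c1 ∧ c1 ≤ '9')) from not_not.mpr ⟨hd0, hd1⟩),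
                  if_pos (show ((c0.toNat : Int) - 48) * 10 + ((c1.toNat : Int) - 48) > 15 by omega)]
            · rw [if_neg (show ¬(((c0.toNat : Int) - 48) * 10 + (c1.toNat : Int) - 48 > 15
                      ∨ decide ('0' ≤ c0 ∧ c0 ≤ '9') = false ∨ decide ('0' ≤ c1 ∧ c1 ≤ '9') = false) from
                    fun hor => hor.elim (fun he => hs he)
                      (fun d => d.elim (fun e => by simp [hd0] at e) (fun e => by simp [hd1] at e))),
                  if_neg (show ¬¬(('0' ≤ c0 ∧ c0 ≤ '9') ∧ ('0' ≤ c1 ∧ c1 ≤ '9')) from not_not.mpr ⟨hd0, hd1⟩),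
                  if_neg (show ¬(((c0.toNat : Int) - 48) * 10 + ((c1.toNat : Int) - 48) > 15) by omega)]
              have hseed : ((c0.toNat : Int) - 48) * 10 + ((c1.toNat : Int) - 48)
                  = ((c0.toNat : Int) - 48) * 10 + (c1.toNat : Int) - 48 := by ring
              rw [hseed]
              rw [loop_eq rest.length rest rfl hev _ 2 rfl []]
              cases crackBLoop rest (((c0.toNat : Int) - 48) * 10 + (c1.toNat : Int) - 48) with
              | none => simp
              | some cs => simp
          · rw [if_pos (Or.inr (Or.inr (by simp [hd1]))),
                if_pos (show ¬(('0' ≤ c0 ∧ c0 ≤ '9') ∧ ('0' ≤ c1 ∧ c1 ≤ '9')) from fun hc => hd1 hc.2)]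
        · rw [if_pos (Or.inr (Or.inl (by simp [hd0]))),
              if_pos (show ¬(('0' ≤ c0 ∧ c0 ≤ '9') ∧ ('0' ≤ c1 ∧ c1 ≤ '9')) from fun hc => hd0 hc.1)]
      · have hnz : (PySem.Int.mod (((rest.length + 1 + 1 : Nat) : Int)) 2 ≠ 0) := by
          rw [hmod]; simp; omega
        rw [if_pos hnz, if_pos (Or.inr hnz)]
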